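-- pv_equiv track=rewrite | github.com/eugenern/Advent-Of-Code | 2025/2/2.py | find_invalids_in_range
-- ===== SOURCE A (Python) =====
-- def find_invalids_in_range(lo, hi):
--     """
--     search range for all invalid IDs
--     """
--     for i in range(lo, hi + 1):
--         i_str = str(i)
--         num_digits = len(i_str)
--         for j in range(2, num_digits + 1):
--             if not num_digits % j and \
--                 all(
--                     i_str[ : num_digits // j] == \
--                         i_str[k * num_digits // j : (k + 1) * num_digits // j] \
--                             for k in range(1, j)
--                 ):
--                 yield i
--                 break
-- ===== SOURCE B (Python) =====
-- def find_invalids_in_range(lo, hi):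
--     """
--     search range for all invalid IDs
--     """
--     found = set()
--     L = 2
--     while 10 ** (L - 1) <= hi:
--         for d in range(1, L):
--             if L % d == 0:
--                 r = (10 ** L - 1) // (10 ** d - 1)
--                 for block in range(10 ** (d - 1), 10 ** d):
--                     n = block * r
--                     if lo <= n <= hi:
--                         found.add(n)
--         L += 1
--     yield from sorted(found)
-- ===== Notes on version B (the rewrite author's own statement) =====
-- stated objective: alternative
-- what changed: Instead of scanning every integer in [lo,hi] and testing all block sizes of its digit string, B directly generates every repeated-block number per (digit-length, block-length divisor) via the repunit closed form block*((10^L-1)//(10^d-1)), dedups with a set and sorts; its cost depends on the count of candidate blocks up to hi rather than on hi-lo (hundreds of times faster on wide ranges, comparable on very narrow ones).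
import Mathlib
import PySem

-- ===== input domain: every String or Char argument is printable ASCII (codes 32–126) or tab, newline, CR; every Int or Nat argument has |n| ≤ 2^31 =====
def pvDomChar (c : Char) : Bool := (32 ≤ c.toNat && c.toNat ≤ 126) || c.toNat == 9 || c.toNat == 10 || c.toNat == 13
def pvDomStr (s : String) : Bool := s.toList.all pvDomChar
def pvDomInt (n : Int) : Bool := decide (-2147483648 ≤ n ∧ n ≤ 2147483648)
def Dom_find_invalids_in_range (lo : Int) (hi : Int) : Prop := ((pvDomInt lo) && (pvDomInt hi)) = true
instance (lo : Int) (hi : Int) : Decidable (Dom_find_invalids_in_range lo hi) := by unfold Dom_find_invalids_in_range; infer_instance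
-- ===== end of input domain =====

-- B replaces A's scan of every integer in [lo,hi] by direct generation of the repeated-block
-- numbers per (digit-length, block-length) pair, deduplicated and sorted (objective: alternative;
-- work scales with the candidate count up to hi instead of with hi-lo).
-- A is a generator; both sides are compared as the list of yielded values.

-- ===== PORT A =====
-- strings are ported on the `List Char` side: i_str = toChars i, len/slices via PySem.List (exact)
def condA (s : List Char) (nd : Int) (j : Int) : Bool :=
  (PySem.Int.mod nd j == 0) &&
    (PySem.List.pyRange 1 j).all (fun k =>
      PySem.List.slice s none (some (PySem.Int.floordiv nd j)) ==
      PySem.List.slice s (some (PySem.Int.floordiv (k * nd) j))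
        (some (PySem.Int.floordiv ((k + 1) * nd) j)))

-- the inner `for j ...: if ...: yield i; break` loop: first satisfying j stops the scan
def jloopA (s : List Char) (nd : Int) : List Int → Bool
  | [] => false
  | j :: rest => if condA s nd j then true else jloopA s nd rest

def checkA (i : Int) : Bool :=
  let s := PySem.Int.toChars i
  let nd : Int := (s.length : Int)
  jloopA s nd (PySem.List.pyRange 2 (nd + 1))

def find_invalids_in_range (lo : Int) (hi : Int) : List Int :=
  (PySem.List.pyRange lo (hi + 1)).foldl
    (fun acc i => if checkA i then acc ++ [i] else acc) []

-- ===== PORT B =====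
-- loop counters L, d are nonnegative Python ints, carried as Nat (range(1, L) = List.range' 1 (L-1))
def blockLoopB (lo : Int) (hi : Int) (r : Int) (found : PySem.Set Int) (blocks : List Int) :
    PySem.Set Int :=
  blocks.foldl (fun fnd block =>
    let n := block * r
    if lo ≤ n ∧ n ≤ hi then fnd.add n else fnd) found

def dLoopB (lo : Int) (hi : Int) (L : Nat) (found : PySem.Set Int) : PySem.Set Int :=
  (List.range' 1 (L - 1)).foldl (fun fnd d =>
    if L % d == 0 then
      blockLoopB lo hi (PySem.Int.floordiv ((10 : Int) ^ L - 1) ((10 : Int) ^ d - 1)) fnd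
        (PySem.List.pyRange ((10 : Int) ^ (d - 1)) ((10 : Int) ^ d))
    else fnd) found

def lLoopB (lo : Int) (hi : Int) (L : Nat) (found : PySem.Set Int) : PySem.Set Int :=
  if h : (10 : Int) ^ (L - 1) ≤ hi then
    lLoopB lo hi (L + 1) (dLoopB lo hi L found)
  else found
termination_by (hi + 1 - (10 : Int) ^ (L - 1)).toNat + (2 - L)
decreasing_by
  rcases Nat.eq_zero_or_pos L with h0 | h0
  · subst h0; omega
  · have h1 : (10 : Int) ^ (L - 1) < (10 : Int) ^ (L + 1 - 1) := by
      apply pow_lt_pow_right₀ (by norm_num) (by omega)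
    omega

def find_invalids_in_range_alt (lo : Int) (hi : Int) : List Int :=
  PySem.List.sorted (lLoopB lo hi 2 []) (fun x => x)

-- ===== PRECONDITION & SPEC =====
def Spec_find_invalids_in_range (lo : Int) (hi : Int) (out : List Int) : Prop := out = find_invalids_in_range_alt lo hi
instance (lo : Int) (hi : Int) (out : List Int) : Decidable (Spec_find_invalids_in_range lo hi out) := by unfold Spec_find_invalids_in_range; infer_instance

-- ===== CLAIM (what is proved, stated in full; the proofs are below) =====
def Claim_equal_find_invalids_in_range : Prop := ∀ (lo : Int) (hi : Int), Dom_find_invalids_in_range lo hi → Spec_find_invalids_in_range lo hi (find_invalids_in_range lo hi)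

-- ===== LEMMAS AND PROOFS =====

lemma core_succ (f n : Nat) (ds : List Char) :
    Nat.toDigitsCore 10 (f+1) n ds =
      if n / 10 = 0 then (n % 10).digitChar :: ds
      else Nat.toDigitsCore 10 f (n / 10) ((n % 10).digitChar :: ds) := by
  simp [Nat.toDigitsCore]

lemma core_eq : ∀ f n ds, n < f →
    Nat.toDigitsCore 10 f n ds = Nat.toDigits 10 n ++ ds := by
  intro f
  induction f using Nat.strong_induction_on with
  | _ f IH =>
    intro n ds h
    match f with
    | f + 1 =>
      rw [core_succ]
      by_cases h0 : n / 10 = 0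
      · simp [h0, Nat.toDigits, core_succ]
      · rw [Nat.toDigits, core_succ]
        simp only [h0, if_false]
        have hlt : n / 10 < n := Nat.div_lt_self (by omega) (by norm_num)
        rw [IH f (by omega) (n/10) _ (by omega),
            IH n (by omega) (n/10) _ (by omega)]
        simp

lemma T_small {n : Nat} (h : n < 10) : Nat.toDigits 10 n = [Nat.digitChar n] := by
  rw [Nat.toDigits, core_succ]
  simp [Nat.div_eq_of_lt h, Nat.mod_eq_of_lt h]

lemma T_step {n : Nat} (h : 10 ≤ n) :
    Nat.toDigits 10 n = Nat.toDigits 10 (n / 10) ++ [Nat.digitChar (n % 10)] := by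
  rw [Nat.toDigits, core_succ]
  have h0 : ¬ n / 10 = 0 := by
    have := Nat.div_le_div_right (c := 10) h; simp at this; omega
  simp only [h0, if_false]
  exact core_eq n (n/10) _ (by omega)

def isDig (c : Char) : Prop := 48 ≤ c.toNat ∧ c.toNat ≤ 57
def dval (c : Char) : Nat := c.toNat - 48
def valC (cs : List Char) : Nat := cs.foldl (fun a c => a * 10 + dval c) 0
def canonC (cs : List Char) : Prop := cs ≠ [] ∧ (∀ c ∈ cs, isDig c) ∧ cs.head? ≠ some '0'

lemma digitChar_isDig {k : Nat} (h : k < 10) : isDig (Nat.digitChar k) := by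
  interval_cases k <;> exact ⟨by decide, by decide⟩
lemma dval_digitChar {k : Nat} (h : k < 10) : dval (Nat.digitChar k) = k := by
  interval_cases k <;> decide
lemma digitChar_ne_zero {k : Nat} (h1 : 1 ≤ k) (h2 : k < 10) : Nat.digitChar k ≠ '0' := by
  interval_cases k <;> decide
lemma dval_lt {c : Char} (h : isDig c) : dval c < 10 := by
  obtain ⟨h1, h2⟩ := h; unfold dval; omega
lemma digitChar_dval {c : Char} (h : isDig c) : Nat.digitChar (dval c) = c := by
  obtain ⟨h1, h2⟩ := h
  have hc : c = Char.ofNat c.toNat := (Char.ofNat_toNat c).symm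
  have : ∀ m, 48 ≤ m → m ≤ 57 → Nat.digitChar (m - 48) = Char.ofNat m := by decide
  show Nat.digitChar (c.toNat - 48) = c
  rw [this c.toNat h1 h2]; exact Char.ofNat_toNat c

lemma valC_go (cs : List Char) : ∀ a : Nat,
    cs.foldl (fun a c => a * 10 + dval c) a = a * 10 ^ cs.length + valC cs := by
  induction cs with
  | nil => intro a; simp [valC]
  | cons c cs ih =>
    intro a
    show cs.foldl _ (a * 10 + dval c) = _
    rw [ih (a * 10 + dval c)]
    have : valC (c :: cs) = dval c * 10 ^ cs.length + valC cs := by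
      show cs.foldl _ (0 * 10 + dval c) = _
      rw [ih (0 * 10 + dval c)]; ring_nf
    rw [this]; simp [List.length_cons]; ring

lemma valC_append (u v : List Char) :
    valC (u ++ v) = valC u * 10 ^ v.length + valC v := by
  unfold valC
  rw [List.foldl_append, valC_go]; rfl

lemma valC_singleton (c : Char) : valC [c] = dval c := by simp [valC]

lemma valC_T (n : Nat) : valC (Nat.toDigits 10 n) = n := by
  induction n using Nat.strong_induction_on with
  | _ n IH =>
    by_cases h : n < 10
    · rw [T_small h, valC_singleton, dval_digitChar h]
    · rw [T_step (by omega), valC_append, valC_singleton,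
        IH (n/10) (Nat.div_lt_self (by omega) (by norm_num)),
        dval_digitChar (Nat.mod_lt _ (by norm_num))]
      simp; omega

lemma digits_T (n : Nat) : ∀ c ∈ Nat.toDigits 10 n, isDig c := by
  induction n using Nat.strong_induction_on with
  | _ n IH =>
    by_cases h : n < 10
    · rw [T_small h]; intro c hc; simp at hc; subst hc; exact digitChar_isDig h
    · rw [T_step (by omega)]
      intro c hc
      rcases List.mem_append.mp hc with hc | hc
      · exact IH (n/10) (Nat.div_lt_self (by omega) (by norm_num)) c hc
      · simp at hc; subst hc; exact digitChar_isDig (Nat.mod_lt _ (by norm_num))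

lemma T_ne_nil (n : Nat) : Nat.toDigits 10 n ≠ [] := by
  by_cases h : n < 10
  · rw [T_small h]; simp
  · rw [T_step (by omega)]; simp

lemma canon_T {n : Nat} (h : 1 ≤ n) : canonC (Nat.toDigits 10 n) := by
  refine ⟨T_ne_nil n, digits_T n, ?_⟩
  induction n using Nat.strong_induction_on with
  | _ n IH =>
    by_cases h10 : n < 10
    · rw [T_small h10]
      simp
      exact digitChar_ne_zero h h10
    · rw [T_step (by omega)]
      have hne := T_ne_nil (n/10)
      have hd : 1 ≤ n / 10 := by
        have := Nat.div_le_div_right (c := 10) (by omega : 10 ≤ n); simp at this; omega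
      have := IH (n/10) (Nat.div_lt_self (by omega) (by norm_num)) hd
      cases hcs : Nat.toDigits 10 (n/10) with
      | nil => exact absurd hcs hne
      | cons a t => rw [hcs] at this; simpa using this

lemma valC_lt {cs : List Char} (h : ∀ c ∈ cs, isDig c) : valC cs < 10 ^ cs.length := by
  induction cs using List.reverseRecOn with
  | nil => simp [valC]
  | append_singleton u c ih =>
    rw [valC_append, valC_singleton]
    have h1 : valC u < 10 ^ u.length := ih (fun x hx => h x (by simp [hx]))
    have h2 : dval c < 10 := dval_lt (h c (by simp))
    simp only [List.length_append, List.length_cons, List.length_nil]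
    calc valC u * 10 ^ 1 + dval c < (valC u + 1) * 10 := by ring_nf; omega
    _ ≤ 10 ^ u.length * 10 := by have := h1; omega
    _ = 10 ^ (u.length + (0 + 1)) := by ring
  
lemma le_valC : ∀ {cs : List Char}, canonC cs → 10 ^ (cs.length - 1) ≤ valC cs := by
  intro cs
  induction cs using List.reverseRecOn with
  | nil => intro h; exact absurd rfl h.1
  | append_singleton u c ih =>
    intro ⟨hne, hdig, hhd⟩
    rcases List.eq_nil_or_concat u with hu | ⟨v, a, hva⟩
    · subst hu
      simp [valC_singleton]
      have : c ≠ '0' := by simpa using hhd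
      have hd := hdig c (by simp)
      have : dval c ≠ 0 := by
        intro h0
        exact this (by rw [← digitChar_dval hd, h0]; rfl)
      omega
    · rw [List.concat_eq_append] at hva
      subst hva
      have hcan : canonC (v ++ [a]) := by
        refine ⟨by simp, fun x hx => hdig x (by simp at hx ⊢; tauto), ?_⟩
        intro hh
        apply hhd
        rcases v with _ | ⟨b, t⟩
        · simpa using hh
        · simpa using hh
      have h1 := ih hcan
      rw [valC_append]
      have hlen : ((v ++ [a]) ++ [c]).length - 1 = ((v++[a]).length - 1) + 1 := by
        simp
      rw [hlen, pow_succ]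
      simp only [List.length_cons, List.length_nil]
      have : 10 ^ ((v ++ [a]).length - 1) * 10 ≤ valC (v ++ [a]) * 10 := by omega
      omega

lemma T_valC : ∀ (k : Nat) (cs : List Char), cs.length ≤ k → canonC cs →
    Nat.toDigits 10 (valC cs) = cs := by
  intro k
  induction k with
  | zero => intro cs h hc; exact absurd (List.eq_nil_of_length_eq_zero (by omega)) hc.1
  | succ k IH =>
    intro cs hlen ⟨hne, hdig, hhd⟩
    rcases List.eq_nil_or_concat cs with h | ⟨u, c, hcs⟩
    · exact absurd h hne
    · rw [List.concat_eq_append] at hcs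
      subst hcs
      rcases List.eq_nil_or_concat u with h | ⟨v, a, hu⟩
      · subst h
        simp only [List.nil_append]
        rw [valC_singleton, T_small (dval_lt (hdig c (by simp)))]
        rw [digitChar_dval (hdig c (by simp))]
      · rw [List.concat_eq_append] at hu
        have hucan : canonC u := by
          refine ⟨by subst hu; simp, fun x hx => hdig x (by simp at hx ⊢; tauto), ?_⟩
          subst hu
          intro hh
          apply hhd
          rcases v with _ | ⟨b, t⟩
          · simpa using hh
          · simpa using hh
        have hm : 1 ≤ valC u := by
          have := le_valC hucan
          have : 0 < 10 ^ (u.length - 1) := pow_pos (by norm_num) _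
          omega
        rw [valC_append, valC_singleton]
        have hdc : dval c < 10 := dval_lt (hdig c (by simp))
        have h10 : 10 ≤ valC u * 10 ^ ([c].length) + dval c := by
          simp only [List.length_cons, List.length_nil]; omega
        rw [T_step h10]
        simp only [List.length_cons, List.length_nil, zero_add, pow_one]
        have hdiv : (valC u * 10 + dval c) / 10 = valC u := by omega
        have hmod : (valC u * 10 + dval c) % 10 = dval c := by omega
        rw [hdiv, hmod, digitChar_dval (hdig c (by simp)),
          IH u (by subst hu; simp at hlen ⊢; omega) hucan]

def repC (b : List Char) : Nat → List Char
  | 0 => []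
  | j + 1 => b ++ repC b j
def Rp (d : Nat) : Nat → Nat
  | 0 => 0
  | j + 1 => Rp d j * 10 ^ d + 1

lemma len_repC (b : List Char) : ∀ j, (repC b j).length = j * b.length := by
  intro j
  induction j with
  | zero => simp [repC]
  | succ j ih => simp [repC, ih]; ring

lemma Rp_flip (d : Nat) : ∀ j, 10 ^ (j * d) + Rp d j = Rp d j * 10 ^ d + 1 := by
  intro j
  induction j with
  | zero => simp [Rp]
  | succ j ih =>
    show 10 ^ ((j + 1) * d) + (Rp d j * 10 ^ d + 1) = (Rp d j * 10 ^ d + 1) * 10 ^ d + 1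
    have h : 10 ^ ((j+1) * d) = 10 ^ (j * d) * 10 ^ d := by rw [← pow_add]; ring_nf
    rw [h]
    calc 10 ^ (j * d) * 10 ^ d + (Rp d j * 10 ^ d + 1)
        = (10 ^ (j * d) + Rp d j) * 10 ^ d + 1 := by ring
      _ = (Rp d j * 10 ^ d + 1) * 10 ^ d + 1 := by rw [ih]

lemma valC_repC {b : List Char} {m : Nat} (hb : b.length = m) : ∀ j,
    valC (repC b j) = valC b * Rp m j := by
  intro j
  induction j with
  | zero => simp [repC, Rp, valC]
  | succ j ih =>
    show valC (b ++ repC b j) = valC b * (Rp m j * 10 ^ m + 1)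
    rw [valC_append, ih, len_repC, hb]
    have h : valC b * 10 ^ (j * m) + valC b * Rp m j = valC b * (10 ^ (j * m) + Rp m j) := by
      ring
    rw [h, Rp_flip]

lemma repunit (d : Nat) : ∀ j, ((10 : Int) ^ d - 1) * Rp d j + 1 = 10 ^ (d * j) := by
  intro j
  induction j with
  | zero => simp [Rp]
  | succ j ih =>
    show ((10 : Int) ^ d - 1) * ↑(Rp d j * 10 ^ d + 1) + 1 = 10 ^ (d * (j + 1))
    have h2 : (10:Int) ^ (d * (j+1)) = 10 ^ (d * j) * 10 ^ d := by rw [← pow_add]; ring_nf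
    push_cast
    push_cast at ih
    rw [h2, ← ih]; ring

lemma r_eq {d : Nat} (hd : 1 ≤ d) (j : Nat) :
    PySem.Int.floordiv ((10 : Int) ^ (d * j) - 1) ((10 : Int) ^ d - 1) = Rp d j := by
  have hb : (0 : Int) < 10 ^ d - 1 := by
    have h : (10:Int) ^ 1 ≤ 10 ^ d := pow_le_pow_right₀ (by norm_num) hd
    simp at h; omega
  have ha : ((10 : Int) ^ (d * j) - 1) = (10 ^ d - 1) * Rp d j := by
    have := repunit d j; omega
  rw [ha, PySem.Int.floordiv_eq_iff_of_pos hb]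
  constructor
  · nlinarith
  · nlinarith

lemma rep_iff {s b : List Char} {m j : Nat} (hb : b = s.take m) (hj : 1 ≤ j)
    (hlen : s.length = j * m) :
    (∀ k, 1 ≤ k → k < j → s.take m = (s.drop (k * m)).take m) ↔ s = repC b j := by
  have hbl : b.length = m := by
    subst hb; rw [List.length_take]
    have hm : m ≤ s.length := by
      rw [hlen]; exact Nat.le_mul_of_pos_left m (by omega)
    omega
  constructor
  · intro h
    have key : ∀ t, t ≤ j → (s.drop ((j - t) * m)) = repC b t := by
      intro t
      induction t with
      | zero =>
        intro _
        rw [Nat.sub_zero]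
        exact List.drop_eq_nil_of_le hlen.le
      | succ t ih =>
        intro ht
        have hk : j - (t + 1) < j := by omega
        have step := (List.take_append_drop m (s.drop ((j - (t+1)) * m))).symm
        rw [List.drop_drop] at step
        have hnext : (j - (t+1)) * m + m = (j - t) * m := by
          have h1 : j - t = (j - (t+1)) + 1 := by omega
          rw [h1]; ring
        have hblock : (s.drop ((j - (t+1)) * m)).take m = b := by
          rcases Nat.eq_zero_or_pos (j - (t+1)) with h0 | h0
          · rw [h0]; simp [hb]
          · exact (h (j - (t+1)) h0 hk).symm.trans hb.symm
        show s.drop ((j - (t+1)) * m) = b ++ repC b t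
        rw [step, hblock, hnext, ih (by omega)]
    have hfin := key j (le_refl j)
    simpa using hfin
  · intro h k hk1 hk2
    have hdrop : ∀ k, k ≤ j → (repC b j).drop (k * m) = repC b (j - k) := by
      intro k
      induction k with
      | zero => intro _; simp
      | succ k ih =>
        intro hk
        have h1 : (k+1) * m = k * m + m := by ring
        rw [h1, ← List.drop_drop, ih (by omega)]
        have h2 : j - k = (j - (k+1)) + 1 := by omega
        rw [h2]
        show (b ++ repC b (j - (k+1))).drop m = _
        rw [List.drop_append_of_le_length (le_of_eq hbl.symm)]
        simp [List.drop_eq_nil_of_le (le_of_eq hbl)]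
    have htake : ∀ t, 1 ≤ t → (repC b t).take m = b := by
      intro t ht
      match t with
      | t + 1 =>
        show (b ++ repC b t).take m = b
        rw [List.take_append_of_le_length (le_of_eq hbl.symm)]
        exact List.take_of_length_le (le_of_eq hbl)
    rw [h, hdrop k (by omega), htake (j - k) (by omega), htake j (by omega)]

def PA (i : Int) : Prop := ∃ j m : ℕ, 2 ≤ j ∧ (PySem.Int.toChars i).length = j * m ∧
  PySem.Int.toChars i = repC ((PySem.Int.toChars i).take m) j

lemma toChars_ne_nil (i : Int) : PySem.Int.toChars i ≠ [] := by
  unfold PySem.Int.toChars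
  split
  · simp
  · exact T_ne_nil _

lemma jloopA_eq_any (s : List Char) (nd : Int) : ∀ js, jloopA s nd js = js.any (condA s nd) := by
  intro js
  induction js with
  | nil => rfl
  | cons j rest ih =>
    show (if condA s nd j then true else jloopA s nd rest) = _
    by_cases h : condA s nd j <;> simp [h, ih]

-- the inner condition for a concrete Nat pair (j, m): A's slice test says "s = (take m s)^j"
lemma condA_iff {i : Int} {j : Nat} (hj : 2 ≤ j) :
    condA (PySem.Int.toChars i) ((PySem.Int.toChars i).length : Int) (j : Int) = true ↔
      ∃ m : ℕ, (PySem.Int.toChars i).length = j * m ∧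
        PySem.Int.toChars i = repC ((PySem.Int.toChars i).take m) j := by
  set s := PySem.Int.toChars i with hs
  have hjpos : (0:Int) < (j:Int) := by exact_mod_cast (by omega : 0 < j)
  unfold condA
  rw [Bool.and_eq_true, beq_iff_eq, PySem.Int.mod_eq_zero_iff_dvd, List.all_eq_true]
  constructor
  · rintro ⟨hdvd, hall⟩
    have hdvdN : j ∣ s.length := by exact_mod_cast hdvd
    set m := s.length / j with hm
    have hlen : s.length = j * m := (Nat.div_mul_cancel hdvdN).symm.trans (by ring)
    refine ⟨m, hlen, ?_⟩
    rw [← rep_iff rfl (by omega) hlen]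
    intro k hk1 hk2
    have hmem : ((k : Int)) ∈ PySem.List.pyRange 1 (j : Int) := by
      rw [PySem.List.mem_pyRange_one]; constructor <;> [exact_mod_cast hk1; exact_mod_cast hk2]
    have := hall _ hmem
    rw [beq_iff_eq] at this
    -- rewrite the slice expressions
    have e1 : PySem.Int.floordiv (s.length : Int) (j : Int) = (m : Int) := by
      rw [PySem.Int.floordiv_natCast]
    have e2 : ((k:Int) * (s.length : Int)) = ((k * s.length : Nat) : Int) := by push_cast; ring
    have e3 : (((k:Int) + 1) * (s.length : Int)) = (((k+1) * s.length : Nat) : Int) := by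
      push_cast; ring
    rw [e1, e2, e3, PySem.Int.floordiv_natCast, PySem.Int.floordiv_natCast] at this
    have d1 : k * s.length / j = k * m := by
      rw [hlen]; rw [show k * (j * m) = j * (k * m) by ring, Nat.mul_div_cancel_left _ (by omega)]
    have d2 : (k+1) * s.length / j = (k+1) * m := by
      rw [hlen]; rw [show (k+1) * (j * m) = j * ((k+1) * m) by ring,
        Nat.mul_div_cancel_left _ (by omega)]
    rw [d1, d2, PySem.List.slice_natCast, PySem.List.slice_to s (Int.natCast_nonneg m)] at this
    have d3 : ((m:Int)).toNat = m := Int.toNat_natCast m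
    rw [d3] at this
    have d4 : (k+1) * m - k * m = m := by ring_nf; omega
    rw [d4] at this
    exact this
  · rintro ⟨m, hlen, hrep⟩
    have hdvdN : j ∣ s.length := ⟨m, hlen⟩
    refine ⟨by exact_mod_cast hdvdN, ?_⟩
    intro kI hkI
    rw [PySem.List.mem_pyRange_one] at hkI
    obtain ⟨hk1, hk2⟩ := hkI
    lift kI to ℕ using (by omega) with k
    rw [beq_iff_eq]
    have hk1' : 1 ≤ k := by exact_mod_cast hk1
    have hk2' : k < j := by exact_mod_cast hk2
    have hfact := (rep_iff rfl (by omega : 1 ≤ j) hlen).mpr hrep k hk1' hk2'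
    have e1 : PySem.Int.floordiv (s.length : Int) (j : Int) = (m : Int) := by
      rw [PySem.Int.floordiv_natCast, hlen, Nat.mul_div_cancel_left _ (by omega)]
    have e2 : ((k:Int) * (s.length : Int)) = ((k * s.length : Nat) : Int) := by push_cast; ring
    have e3 : (((k:Int) + 1) * (s.length : Int)) = (((k+1) * s.length : Nat) : Int) := by
      push_cast; ring
    rw [e1, e2, e3, PySem.Int.floordiv_natCast, PySem.Int.floordiv_natCast]
    have d1 : k * s.length / j = k * m := by
      rw [hlen]; rw [show k * (j * m) = j * (k * m) by ring, Nat.mul_div_cancel_left _ (by omega)]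
    have d2 : (k+1) * s.length / j = (k+1) * m := by
      rw [hlen]; rw [show (k+1) * (j * m) = j * ((k+1) * m) by ring,
        Nat.mul_div_cancel_left _ (by omega)]
    rw [d1, d2, PySem.List.slice_natCast, PySem.List.slice_to s (Int.natCast_nonneg m)]
    have d3 : ((m:Int)).toNat = m := Int.toNat_natCast m
    have d4 : (k+1) * m - k * m = m := by ring_nf; omega
    rw [d3, d4]
    exact hfact

lemma checkA_iff {i : Int} : checkA i = true ↔ PA i := by
  unfold checkA PA
  rw [jloopA_eq_any, List.any_eq_true]
  constructor
  · rintro ⟨jI, hmem, hcond⟩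
    rw [PySem.List.mem_pyRange_one] at hmem
    obtain ⟨h2, hlt⟩ := hmem
    lift jI to ℕ using (by omega) with j
    have hj2 : 2 ≤ j := by exact_mod_cast h2
    obtain ⟨m, hlen, hrep⟩ := (condA_iff hj2).mp hcond
    exact ⟨j, m, hj2, hlen, hrep⟩
  · rintro ⟨j, m, hj2, hlen, hrep⟩
    refine ⟨(j : Int), ?_, (condA_iff hj2).mpr ⟨m, hlen, hrep⟩⟩
    rw [PySem.List.mem_pyRange_one]
    have hm1 : 1 ≤ m := by
      by_contra h
      have : m = 0 := by omega
      subst this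
      simp at hlen
      exact toChars_ne_nil i hlen
    have hjle : j ≤ (PySem.Int.toChars i).length := by
      rw [hlen]; exact Nat.le_mul_of_pos_right j (by omega)
    constructor
    · exact_mod_cast hj2
    · have : ((PySem.Int.toChars i).length : Int) ≥ (j : Int) := by exact_mod_cast hjle
      omega

def Gen (lo hi : Int) (L : Nat) (x : Int) : Prop :=
  ∃ d : Nat, 1 ≤ d ∧ d < L ∧ L % d = 0 ∧
    ∃ block : Int, (10 : Int) ^ (d - 1) ≤ block ∧ block < (10 : Int) ^ d ∧
      x = block * PySem.Int.floordiv ((10 : Int) ^ L - 1) ((10 : Int) ^ d - 1) ∧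
      lo ≤ x ∧ x ≤ hi

lemma mem_repC {c : Char} {b : List Char} : ∀ {t : Nat}, c ∈ repC b t → c ∈ b := by
  intro t
  induction t with
  | zero => intro h; simp [repC] at h
  | succ t ih =>
    intro h
    rcases List.mem_append.mp h with h | h
    · exact h
    · exact ih h

lemma len_eq_of_pow_bounds {n L d : Nat} (h1 : 10 ^ (d-1) ≤ n) (h2 : n < 10 ^ d)
    (h3 : 10 ^ (L-1) ≤ n) (h4 : n < 10 ^ L) (hd : 1 ≤ d) (hL : 1 ≤ L) : L = d := by
  by_contra h
  rcases Nat.lt_or_ge L d with hlt | hge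
  · have : (10:Nat) ^ L ≤ 10 ^ (d-1) := Nat.pow_le_pow_right (by norm_num) (by omega)
    omega
  · have hgt : d < L := by omega
    have : (10:Nat) ^ d ≤ 10 ^ (L-1) := Nat.pow_le_pow_right (by norm_num) (by omega)
    omega

lemma toChars_nonneg {x : Int} (h : 0 ≤ x) :
    PySem.Int.toChars x = Nat.toDigits 10 x.toNat := by
  unfold PySem.Int.toChars
  rw [if_neg (by omega)]

lemma toChars_neg {x : Int} (h : x < 0) :
    PySem.Int.toChars x = '-' :: Nat.toDigits 10 x.natAbs := by
  unfold PySem.Int.toChars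
  rw [if_pos h]

lemma head?_take {s : List Char} {m : Nat} (hm : 1 ≤ m) : (s.take m).head? = s.head? := by
  cases s with
  | nil => simp
  | cons c t =>
    match m, hm with
    | m + 1, _ => simp

lemma main_iff {x lo hi : Int} (hlo : lo ≤ x) (hhi : x ≤ hi) :
    PA x ↔ ∃ L : Nat, 2 ≤ L ∧ (10 : Int) ^ (L - 1) ≤ hi ∧ Gen lo hi L x := by
  constructor
  · rintro ⟨j, m, hj2, hlen, hrep⟩
    set s := PySem.Int.toChars x with hs
    have hm1 : 1 ≤ m := by
      by_contra h
      have hm0 : m = 0 := by omega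
      rw [hm0, Nat.mul_zero] at hlen
      exact toChars_ne_nil x (List.eq_nil_of_length_eq_zero hlen)
    have hmle : m ≤ s.length := by rw [hlen]; exact Nat.le_mul_of_pos_left m (by omega)
    rcases Int.lt_or_le x 0 with hneg | hpos
    · -- a negative number's string starts with '-' which cannot recur at position m ≥ 1
      exfalso
      have hsneg : s = '-' :: Nat.toDigits 10 x.natAbs := by rw [hs, toChars_neg hneg]
      set b := s.take m with hb
      have hbhead : b = '-' :: (Nat.toDigits 10 x.natAbs).take (m - 1) := by
        rw [hb, hsneg]
        match m, hm1 with
        | m + 1, _ => simp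
      have hmem : '-' ∈ repC b (j - 1) := by
        match hj' : j - 1, (by omega : 1 ≤ j - 1) with
        | t + 1, _ => exact List.mem_append.mpr (Or.inl (by rw [hbhead]; simp))
      have hsplit : s = b ++ repC b (j - 1) := by
        rw [hrep]
        match hj' : j, hj2 with
        | j + 1, _ => simp [repC]
      have : '-' ∈ Nat.toDigits 10 x.natAbs := by
        have h1 : '-' ∈ List.drop b.length s := by
          rw [hsplit, List.drop_append_of_le_length (le_refl _)]
          simpa using hmem
        have hblen : b.length = m := by rw [hb]; simp [List.length_take]; omega
        have h2 : List.drop b.length s = List.drop (m - 1) (Nat.toDigits 10 x.natAbs) := by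
          rw [hblen, hsneg]
          match m, hm1 with
          | m + 1, _ => simp
        rw [h2] at h1
        exact List.mem_of_mem_drop h1
      have := digits_T x.natAbs '-' this
      simp [isDig] at this
    · -- nonnegative case: read off block and length
      have hsT : s = Nat.toDigits 10 x.toNat := by rw [hs, toChars_nonneg hpos]
      have hL2 : 2 ≤ s.length := by
        calc 2 = 2 * 1 := rfl
        _ ≤ j * m := Nat.mul_le_mul hj2 hm1
        _ = s.length := hlen.symm
      have hn1 : 1 ≤ x.toNat := by
        by_contra h
        have : x.toNat = 0 := by omega
        rw [this] at hsT
        have hlone : s.length = 1 := by rw [hsT, T_small (by norm_num)]; rfl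
        omega
      set b := s.take m with hb
      have hblen : b.length = m := by
        rw [hb, List.length_take]; omega
      have hcs : canonC s := by rw [hsT]; exact canon_T hn1
      have hcb : canonC b := by
        refine ⟨by rw [← List.length_pos_iff]; omega,
          fun c hc => hcs.2.1 c (List.mem_of_mem_take hc), ?_⟩
        rw [hb, head?_take hm1]
        exact hcs.2.2
      have hvs : valC s = valC b * Rp m j := by
        conv_lhs => rw [hrep]
        exact valC_repC hblen j
      have hvx : valC s = x.toNat := by rw [hsT, valC_T]
      have hlow : 10 ^ (m - 1) ≤ valC b := by
        have := le_valC hcb; rwa [hblen] at this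
      have hhigh : valC b < 10 ^ m := by
        have := valC_lt hcb.2.1; rwa [hblen] at this
      have hpowle : (10 : Int) ^ (s.length - 1) ≤ x := by
        have h1 : (10:Nat) ^ (s.length - 1) ≤ valC s := le_valC hcs
        rw [hvx] at h1
        have : ((10:Nat) ^ (s.length - 1) : Int) ≤ (x.toNat : Int) := by exact_mod_cast h1
        push_cast at this
        omega
      refine ⟨s.length, hL2, by omega, m, hm1, ?_, ?_, (valC b : Int), ?_, ?_, ?_, hlo, hhi⟩
      · have : 2 * m ≤ j * m := Nat.mul_le_mul_right m hj2
        omega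
      · rw [hlen]; exact Nat.mul_mod_left j m
      · exact_mod_cast hlow
      · exact_mod_cast hhigh
      · have hLmj : s.length = m * j := by rw [hlen]; ring
        rw [hLmj, r_eq hm1 j]
        have hxn : x = (x.toNat : Int) := by omega
        rw [hxn, ← hvx, hvs]
        push_cast
        ring
  · rintro ⟨L, hL2, hLhi, d, hd1, hdL, hmod, block, hb1, hb2, hx, hlo', hhi'⟩
    have hdvd : d ∣ L := Nat.dvd_of_mod_eq_zero hmod
    set j := L / d with hj
    have hjd : L = j * d := by rw [hj, Nat.div_mul_cancel hdvd]
    have hj2 : 2 ≤ j := by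
      rcases Nat.lt_or_ge j 2 with hlt | hge
      · interval_cases j <;> omega
      · exact hge
    have hr : PySem.Int.floordiv ((10:Int)^L - 1) ((10:Int)^d - 1) = Rp d j := by
      rw [show L = d * j from by rw [hjd]; ring]
      exact r_eq hd1 j
    have hblockpos : (0:Int) < block := by
      have : (0:Int) < 10 ^ (d - 1) := by positivity
      omega
    set bn := block.toNat with hbn
    have hbni : (bn : Int) = block := Int.toNat_of_nonneg hblockpos.le
    have hnb1 : 10 ^ (d - 1) ≤ bn := by
      have : ((10:Nat) ^ (d-1) : Int) ≤ (bn : Int) := by rw [hbni]; push_cast; omega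
      exact_mod_cast this
    have hnb2 : bn < 10 ^ d := by
      have : (bn : Int) < ((10:Nat) ^ d : Int) := by rw [hbni]; push_cast; omega
      exact_mod_cast this
    have hbn1 : 1 ≤ bn := by
      have : (1:Nat) ≤ 10 ^ (d-1) := Nat.one_le_pow _ _ (by norm_num)
      omega
    set bs := Nat.toDigits 10 bn with hbs
    have hcbs : canonC bs := canon_T hbn1
    have hvbs : valC bs = bn := valC_T bn
    have hbsd : bs.length = d := by
      have hne := hcbs.1
      have hlen1 : 1 ≤ bs.length := by
        rw [Nat.one_le_iff_ne_zero]
        intro h0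
        exact hne (List.eq_nil_of_length_eq_zero h0)
      have h3 : 10 ^ (bs.length - 1) ≤ bn := by rw [← hvbs]; exact le_valC hcbs
      have h4 : bn < 10 ^ bs.length := by rw [← hvbs]; exact valC_lt hcbs.2.1
      exact len_eq_of_pow_bounds hnb1 hnb2 h3 h4 hd1 hlen1
    set s := repC bs j with hsdef
    have hslen : s.length = j * d := by rw [hsdef, len_repC, hbsd]
    have hstake : s.take d = bs := by
      rw [hsdef]
      match hj' : j, hj2 with
      | j + 1, _ =>
        show (bs ++ repC bs j).take d = bs
        rw [List.take_append_of_le_length (le_of_eq hbsd.symm)]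
        exact List.take_of_length_le (le_of_eq hbsd)
    have hcans : canonC s := by
      refine ⟨?_, fun c hc => hcbs.2.1 c (mem_repC hc), ?_⟩
      · rw [← List.length_pos_iff, hslen]
        have : 0 < d := hd1
        positivity
      · rw [← head?_take (s := s) hd1, hstake]
        exact hcbs.2.2
    have hvals : valC s = bn * Rp d j := by
      rw [hsdef, valC_repC hbsd j, hvbs]
    have hxpos : 0 ≤ x := by
      rw [hx, hr]
      positivity
    have hxt : x.toNat = bn * Rp d j := by
      have : x = ((bn * Rp d j : Nat) : Int) := by
        rw [hx, hr, ← hbni]; push_cast; ring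
      omega
    have htc : PySem.Int.toChars x = s := by
      rw [toChars_nonneg hxpos, hxt, ← hvals]
      exact T_valC s.length s (le_refl _) hcans
    exact ⟨j, d, hj2, by rw [htc]; exact hslen, by rw [htc, hstake, ← hsdef]⟩

lemma mem_blockLoop {lo hi r x : Int} : ∀ (blocks : List Int) (found : PySem.Set Int),
    (x ∈ blockLoopB lo hi r found blocks ↔
      x ∈ found ∨ ∃ b ∈ blocks, x = b * r ∧ lo ≤ x ∧ x ≤ hi) := by
  intro blocks
  induction blocks with
  | nil => intro found; simp [blockLoopB]
  | cons b bs ih =>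
    intro found
    show x ∈ blockLoopB lo hi r (if lo ≤ b * r ∧ b * r ≤ hi then found.add (b*r) else found) bs ↔ _
    rw [ih]
    by_cases hc : lo ≤ b * r ∧ b * r ≤ hi
    · rw [if_pos hc, PySem.Set.mem_add]
      constructor
      · rintro (⟨h | h⟩ | h)
        · exact Or.inl h
        · exact Or.inr ⟨b, by simp, by rw [h], by rw [h]; exact hc.1, by rw [h]; exact hc.2⟩
        · obtain ⟨c, hc1, hc2⟩ := h
          exact Or.inr ⟨c, by simp [hc1], hc2⟩
      · rintro (h | ⟨c, hcmem, hc2, hc3, hc4⟩)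
        · exact Or.inl (Or.inl h)
        · rcases List.mem_cons.mp hcmem with rfl | hmem
          · exact Or.inl (Or.inr (by rw [hc2]))
          · exact Or.inr ⟨c, hmem, hc2, hc3, hc4⟩
    · rw [if_neg hc]
      constructor
      · rintro (h | ⟨c, hcmem, hc2, hc3, hc4⟩)
        · exact Or.inl h
        · exact Or.inr ⟨c, by simp [hcmem], hc2, hc3, hc4⟩
      · rintro (h | ⟨c, hcmem, hc2, hc3, hc4⟩)
        · exact Or.inl h
        · rcases List.mem_cons.mp hcmem with rfl | hmem
          · exact absurd ⟨by omega, by omega⟩ hc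
          · exact Or.inr ⟨c, hmem, hc2, hc3, hc4⟩

lemma mem_dLoop {lo hi x : Int} {L : Nat} (found : PySem.Set Int) :
    x ∈ dLoopB lo hi L found ↔ x ∈ found ∨ Gen lo hi L x := by
  have key : ∀ (ds : List Nat) (fnd : PySem.Set Int),
      x ∈ ds.foldl (fun fnd d =>
        if L % d == 0 then
          blockLoopB lo hi (PySem.Int.floordiv ((10 : Int) ^ L - 1) ((10 : Int) ^ d - 1)) fnd
            (PySem.List.pyRange ((10 : Int) ^ (d - 1)) ((10 : Int) ^ d))
        else fnd) fnd ↔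
      x ∈ fnd ∨ ∃ d ∈ ds, L % d = 0 ∧
        ∃ block : Int, (10:Int) ^ (d-1) ≤ block ∧ block < (10:Int) ^ d ∧
          x = block * PySem.Int.floordiv ((10 : Int) ^ L - 1) ((10 : Int) ^ d - 1) ∧
          lo ≤ x ∧ x ≤ hi := by
    intro ds
    induction ds with
    | nil => intro fnd; simp
    | cons d ds ih =>
      intro fnd
      show x ∈ ds.foldl _ (if L % d == 0 then _ else fnd) ↔ _
      rw [ih]
      by_cases hd : L % d = 0
      · rw [if_pos (by simpa using hd), mem_blockLoop]
        constructor
        · rintro ((h | ⟨b, hbmem, h2, h3, h4⟩) | ⟨d', hd'⟩)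
          · exact Or.inl h
          · rw [PySem.List.mem_pyRange_one] at hbmem
            exact Or.inr ⟨d, by simp, hd, b, hbmem.1, hbmem.2, h2, h3, h4⟩
          · exact Or.inr ⟨d', by simp [hd'.1], hd'.2⟩
        · rintro (h | ⟨d', hd'mem, hmod, block, h1, h2, h3, h4, h5⟩)
          · exact Or.inl (Or.inl h)
          · rcases List.mem_cons.mp hd'mem with rfl | hmem
            · exact Or.inl (Or.inr ⟨block, PySem.List.mem_pyRange_one.mpr ⟨h1, h2⟩, h3, h4, h5⟩)
            · exact Or.inr ⟨d', hmem, hmod, block, h1, h2, h3, h4, h5⟩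
      · rw [if_neg (by simpa using hd)]
        constructor
        · rintro (h | ⟨d', hd'⟩)
          · exact Or.inl h
          · exact Or.inr ⟨d', by simp [hd'.1], hd'.2⟩
        · rintro (h | ⟨d', hd'mem, hrest⟩)
          · exact Or.inl h
          · rcases List.mem_cons.mp hd'mem with rfl | hmem
            · exact absurd hrest.1 hd
            · exact Or.inr ⟨d', hmem, hrest⟩
  rw [dLoopB, key]
  constructor
  · rintro (h | ⟨d, hdmem, hrest⟩)
    · exact Or.inl h
    · rw [List.mem_range'_1] at hdmem
      exact Or.inr ⟨d, hdmem.1, by omega, hrest⟩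
  · rintro (h | ⟨d, h1, h2, hrest⟩)
    · exact Or.inl h
    · exact Or.inr ⟨d, List.mem_range'_1.mpr ⟨h1, by omega⟩, hrest⟩

lemma mem_lLoop {lo hi x : Int} : ∀ (L : Nat) (found : PySem.Set Int),
    x ∈ lLoopB lo hi L found ↔
      x ∈ found ∨ ∃ L' : Nat, L ≤ L' ∧ (10 : Int) ^ (L' - 1) ≤ hi ∧ Gen lo hi L' x := by
  intro L found
  induction L, found using lLoopB.induct lo hi with
  | case1 L found h ih =>
    rw [lLoopB, dif_pos h, ih, mem_dLoop]
    constructor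
    · rintro ((hf | hg) | ⟨L', h1, h2, h3⟩)
      · exact Or.inl hf
      · exact Or.inr ⟨L, le_refl _, h, hg⟩
      · exact Or.inr ⟨L', by omega, h2, h3⟩
    · rintro (hf | ⟨L', h1, h2, h3⟩)
      · exact Or.inl (Or.inl hf)
      · rcases Nat.eq_or_lt_of_le h1 with rfl | hlt
        · exact Or.inl (Or.inr h3)
        · exact Or.inr ⟨L', by omega, h2, h3⟩
  | case2 L found h =>
    rw [lLoopB, dif_neg h]
    constructor
    · exact Or.inl
    · rintro (hf | ⟨L', h1, h2, h3⟩)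
      · exact hf
      · exfalso
        apply h
        calc (10:Int) ^ (L - 1) ≤ 10 ^ (L' - 1) :=
          pow_le_pow_right₀ (by norm_num) (by omega)
        _ ≤ hi := h2

lemma nodup_blockLoop {lo hi r : Int} : ∀ (blocks : List Int) (found : PySem.Set Int),
    found.Nodup → (blockLoopB lo hi r found blocks).Nodup := by
  intro blocks
  induction blocks with
  | nil => intro found h; exact h
  | cons b bs ih =>
    intro found h
    show (blockLoopB lo hi r (if lo ≤ b * r ∧ b * r ≤ hi then found.add (b*r) else found) bs).Nodup
    split
    · exact ih _ (PySem.Set.nodup_add found _ h)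
    · exact ih _ h

lemma nodup_dLoop {lo hi : Int} {L : Nat} (found : PySem.Set Int) (h : found.Nodup) :
    (dLoopB lo hi L found).Nodup := by
  rw [dLoopB]
  generalize List.range' 1 (L - 1) = ds
  induction ds generalizing found with
  | nil => exact h
  | cons d ds ih =>
    show (ds.foldl _ (if L % d == 0 then _ else found)).Nodup
    split
    · exact ih _ (nodup_blockLoop _ _ h)
    · exact ih _ h

lemma nodup_lLoop {lo hi : Int} : ∀ (L : Nat) (found : PySem.Set Int),
    found.Nodup → (lLoopB lo hi L found).Nodup := by
  intro L found
  induction L, found using lLoopB.induct lo hi with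
  | case1 L found hcond ih =>
    intro h
    rw [lLoopB, dif_pos hcond]
    exact ih (nodup_dLoop _ h)
  | case2 L found hcond =>
    intro h
    rw [lLoopB, dif_neg hcond]
    exact h

lemma pyRange_pairwise (a b : Int) : (PySem.List.pyRange a b).Pairwise (· < ·) := by
  rcases Int.lt_or_le a b with h | h
  · have hlen : (b - a).toNat ≠ 0 := by omega
    obtain ⟨n, hn⟩ : ∃ n, (b - a).toNat = n := ⟨_, rfl⟩
    induction n generalizing a with
    | zero => omega
    | succ n ihn =>
      rw [PySem.List.pyRange_one_cons h]
      rw [List.pairwise_cons]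
      refine ⟨fun y hy => ?_, ?_⟩
      · rw [PySem.List.mem_pyRange_one] at hy
        omega
      · rcases Int.lt_or_le (a+1) b with h2 | h2
        · exact ihn (a+1) h2 (by omega) (by omega)
        · have : PySem.List.pyRange (a+1) b = [] := by
            rw [List.eq_nil_iff_forall_not_mem]
            intro y hy
            rw [PySem.List.mem_pyRange_one] at hy
            omega
          rw [this]
          exact List.Pairwise.nil
  · have : PySem.List.pyRange a b = [] := by
      rw [List.eq_nil_iff_forall_not_mem]
      intro y hy
      rw [PySem.List.mem_pyRange_one] at hy
      omega
    rw [this]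
    exact List.Pairwise.nil

lemma A_eq_filter (lo hi : Int) :
    find_invalids_in_range lo hi = (PySem.List.pyRange lo (hi + 1)).filter checkA := by
  rw [find_invalids_in_range, PySem.List.foldl_append_if checkA (fun i => i)]
  simp [List.map_id']

-- ===== VERDICT (by name: the statement is the Claim_ definition above) =====
theorem find_invalids_in_range_spec : Claim_equal_find_invalids_in_range := by
  intro lo hi _
  show find_invalids_in_range lo hi = find_invalids_in_range_alt lo hi
  rw [find_invalids_in_range_alt, A_eq_filter]
  symm
  apply PySem.List.sorted_eq_of_perm_of_pairwise_lt
  · rw [List.perm_ext_iff_of_nodup (List.Nodup.filter _ ?nd) (nodup_lLoop 2 [] List.nodup_nil)]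
    case nd =>
      exact (pyRange_pairwise lo (hi+1)).imp (fun h => ne_of_lt h)
    intro y
    rw [List.mem_filter, PySem.List.mem_pyRange_one, mem_lLoop]
    constructor
    · rintro ⟨⟨h1, h2⟩, hchk⟩
      have := (main_iff h1 (show y ≤ hi by omega)).mp (checkA_iff.mp hchk)
      obtain ⟨L, hL⟩ := this
      exact Or.inr ⟨L, hL.1, hL.2⟩
    · rintro (h | ⟨L', h1, h2, h3⟩)
      · simp at h
      · have h3' := h3
        obtain ⟨d, _, _, _, block, _, _, _, hlo, hhi⟩ := h3'
        refine ⟨⟨hlo, by omega⟩, ?_⟩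
        rw [checkA_iff]
        exact (main_iff hlo hhi).mpr ⟨L', by omega, h2, h3⟩
  · exact (pyRange_pairwise lo (hi+1)).filter _
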